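-- pv_equiv track=rewrite | github.com/Denis172003/CV-Analyser | ai_integration.py | _extract_best_achievement
-- ===== SOURCE A (Python) =====
-- from typing import Dict, List, Optional
--
-- def _extract_best_achievement(strengths: List[Dict]) -> str:
--     """
--     Extract the best achievement from strengths list.
--
--     Args:
--         strengths: List of strength dictionaries
--
--     Returns:
--         Best achievement text for video script
--     """
--     if not strengths:
--         return "with proven results and strong performance"
--
--     # Look for quantifiable achievements first
--     for strength in strengths:
--         evidence = strength.get('evidence', '')
--         if evidence and any(char.isdigit() for char in evidence):
--             # Clean up the evidence text for video
--             clean_evidence = evidence.strip()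
--             if not clean_evidence.lower().startswith('i '):
--                 clean_evidence = f"I {clean_evidence.lower()}"
--             return clean_evidence
--
--     # Look for achievements with impact words
--     impact_words = ['increased', 'improved', 'developed', 'created', 'led', 'managed', 'achieved', 'delivered']
--     for strength in strengths:
--         evidence = strength.get('evidence', '')
--         if evidence and any(word in evidence.lower() for word in impact_words):
--             clean_evidence = evidence.strip()
--             if not clean_evidence.lower().startswith('i '):
--                 clean_evidence = f"I {clean_evidence.lower()}"
--             return clean_evidence
--
--     # Fallback to first strength evidence
--     first_evidence = strengths[0].get('evidence', 'with proven results')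
--     if first_evidence:
--         clean_evidence = first_evidence.strip()
--         if not clean_evidence.lower().startswith('i '):
--             clean_evidence = f"I {clean_evidence.lower()}"
--         return clean_evidence
--
--     return "with proven results and strong performance"
-- ===== SOURCE B (Python) =====
-- def _extract_best_achievement(strengths):
--     """One pass: track the best-priority candidate (0 = has digit, 1 = impact word)."""
--     impact_words = ['increased', 'improved', 'developed', 'created', 'led', 'managed', 'achieved', 'delivered']
--
--     def clean(text):
--         c = text.strip()
--         return c if c.lower().startswith('i ') else "I " + c.lower()
--
--     best = None  # (priority, evidence) with the smallest priority seen, earliest wins ties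
--     for strength in strengths:
--         evidence = strength.get('evidence', '')
--         if not evidence:
--             continue
--         if any(ch.isdigit() for ch in evidence):
--             best = (0, evidence)
--             break  # priority 0 is unbeatable and earliest-first
--         if any(w in evidence.lower() for w in impact_words):
--             if best is None or 1 < best[0]:
--                 best = (1, evidence)
--     if best is not None:
--         return clean(best[1])
--     if not strengths:
--         return "with proven results and strong performance"
--     first_evidence = strengths[0].get('evidence', 'with proven results')
--     if first_evidence:
--         return clean(first_evidence)
--     return "with proven results and strong performance"
-- ===== Notes on version B (the rewrite author's own statement) =====
-- stated objective: alternative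
-- what changed: Replaces A's two sequential full scans (digits pass, then impact-words pass) by a single pass that keeps the earliest candidate of minimal priority (0 = contains a digit, breaking immediately; 1 = impact word), cleaning once at the end.
import Mathlib
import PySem

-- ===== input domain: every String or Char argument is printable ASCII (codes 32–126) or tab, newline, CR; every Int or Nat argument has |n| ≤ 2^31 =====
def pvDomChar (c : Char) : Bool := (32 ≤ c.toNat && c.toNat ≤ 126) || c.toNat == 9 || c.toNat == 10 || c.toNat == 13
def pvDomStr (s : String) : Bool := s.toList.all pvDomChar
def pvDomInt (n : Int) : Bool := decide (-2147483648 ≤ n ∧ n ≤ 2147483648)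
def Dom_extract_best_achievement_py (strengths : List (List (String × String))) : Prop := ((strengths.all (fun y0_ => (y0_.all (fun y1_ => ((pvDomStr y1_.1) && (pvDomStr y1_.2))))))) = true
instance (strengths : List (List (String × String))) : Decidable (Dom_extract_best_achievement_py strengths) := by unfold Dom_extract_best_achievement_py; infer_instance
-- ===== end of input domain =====

-- One honest line: B replaces A's two sequential scans by a single pass keeping the
-- earliest minimal-priority candidate (alternative decomposition, same cost).

-- ===== PORT A =====

-- the repeated clean-up block of A: strip, then prefix "I " + lowercase unless it starts with "i "
def pvCleanA (ev : String) : String :=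
  let c := PySem.Str.strip ev
  if PySem.Str.startswith (PySem.Str.lower c) "i " then c
  else String.ofList ("I ".toList ++ (PySem.Str.lower c).toList)

def pvImpactWords : List String :=
  ["increased", "improved", "developed", "created", "led", "managed", "achieved", "delivered"]

-- first loop of A: first evidence containing a digit, already cleaned
def pvLoopDigitA : List (List (String × String)) → Option String
  | [] => none
  | st :: rest =>
    let ev := PySem.Dict.getD (PySem.Dict.mk st) "evidence" ""
    if ev ≠ "" ∧ ev.toList.any (fun c => PySem.Str.isdigit c) = true then some (pvCleanA ev)
    else pvLoopDigitA rest

-- second loop of A: first evidence containing an impact word, already cleaned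
def pvLoopImpactA : List (List (String × String)) → Option String
  | [] => none
  | st :: rest =>
    let ev := PySem.Dict.getD (PySem.Dict.mk st) "evidence" ""
    if ev ≠ "" ∧ pvImpactWords.any (fun w => PySem.Str.isIn w (PySem.Str.lower ev)) = true then
      some (pvCleanA ev)
    else pvLoopImpactA rest

def extract_best_achievement_py (strengths : List (List (String × String))) : String :=
  match strengths with
  | [] => "with proven results and strong performance"
  | first :: _ =>
    match pvLoopDigitA strengths with
    | some r => r
    | none =>
      match pvLoopImpactA strengths with
      | some r => r
      | none =>
        let fe := PySem.Dict.getD (PySem.Dict.mk first) "evidence" "with proven results"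
        if fe ≠ "" then pvCleanA fe
        else "with proven results and strong performance"

-- ===== PORT B =====

def pvCleanB (text : String) : String :=
  let c := PySem.Str.strip text
  if PySem.Str.startswith (PySem.Str.lower c) "i " then c
  else String.ofList ("I ".toList ++ (PySem.Str.lower c).toList)

-- B's single pass: state = best (priority, evidence) so far; breaks on priority 0
def pvLoopB : List (List (String × String)) → Option (Nat × String) → Option (Nat × String)
  | [], best => best
  | st :: rest, best =>
    let ev := PySem.Dict.getD (PySem.Dict.mk st) "evidence" ""
    if ev = "" then pvLoopB rest best
    else if ev.toList.any (fun c => PySem.Str.isdigit c) then some (0, ev)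
    else if pvImpactWords.any (fun w => PySem.Str.isIn w (PySem.Str.lower ev)) then
      pvLoopB rest (match best with
        | none => some (1, ev)
        | some (p, e) => if 1 < p then some (1, ev) else some (p, e))
    else pvLoopB rest best

def extract_best_achievement_py_alt (strengths : List (List (String × String))) : String :=
  match pvLoopB strengths none with
  | some (_, ev) => pvCleanB ev
  | none =>
    match strengths with
    | [] => "with proven results and strong performance"
    | first :: _ =>
      let fe := PySem.Dict.getD (PySem.Dict.mk first) "evidence" "with proven results"
      if fe ≠ "" then pvCleanB fe
      else "with proven results and strong performance"

-- ===== PRECONDITION & SPEC =====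
def Spec_extract_best_achievement_py (strengths : List (List (String × String))) (out : String) : Prop := out = extract_best_achievement_py_alt strengths
instance (strengths : List (List (String × String))) (out : String) : Decidable (Spec_extract_best_achievement_py strengths out) := by unfold Spec_extract_best_achievement_py; infer_instance

-- ===== CLAIM (what is proved, stated in full; the proofs are below) =====
def Claim_equal_extract_best_achievement_py : Prop := ∀ (strengths : List (List (String × String))), Dom_extract_best_achievement_py strengths → Spec_extract_best_achievement_py strengths (extract_best_achievement_py strengths)

-- ===== LEMMAS AND PROOFS =====

-- proof-side: the raw (uncleaned) first digit-carrying / impact-carrying evidence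
def pvFirstDigit : List (List (String × String)) → Option String
  | [] => none
  | st :: rest =>
    let ev := PySem.Dict.getD (PySem.Dict.mk st) "evidence" ""
    if ev ≠ "" ∧ ev.toList.any (fun c => PySem.Str.isdigit c) = true then some ev
    else pvFirstDigit rest

def pvFirstImpact : List (List (String × String)) → Option String
  | [] => none
  | st :: rest =>
    let ev := PySem.Dict.getD (PySem.Dict.mk st) "evidence" ""
    if ev ≠ "" ∧ pvImpactWords.any (fun w => PySem.Str.isIn w (PySem.Str.lower ev)) = true then
      some ev
    else pvFirstImpact rest

theorem pvLoopDigitA_eq (l : List (List (String × String))) :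
    pvLoopDigitA l = (pvFirstDigit l).map pvCleanA := by
  induction l with
  | nil => rfl
  | cons st rest ih =>
    simp only [pvLoopDigitA, pvFirstDigit]
    split_ifs <;> simp [ih]

theorem pvLoopImpactA_eq (l : List (List (String × String))) :
    pvLoopImpactA l = (pvFirstImpact l).map pvCleanA := by
  induction l with
  | nil => rfl
  | cons st rest ih =>
    simp only [pvLoopImpactA, pvFirstImpact]
    split_ifs <;> simp [ih]

-- the single-pass loop of B, characterised by A's two notional scans
theorem pvLoopB_spec (l : List (List (String × String))) (b : Option String) :
    pvLoopB l (b.map (fun e => (1, e))) =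
      match pvFirstDigit l with
      | some ev => some (0, ev)
      | none =>
        match b with
        | some e => some (1, e)
        | none => (pvFirstImpact l).map (fun ev => (1, ev))
    := by
  induction l generalizing b with
  | nil => cases b <;> rfl
  | cons st rest ih =>
    simp only [pvLoopB, pvFirstDigit, pvFirstImpact]
    by_cases h1 : PySem.Dict.getD (PySem.Dict.mk st) "evidence" "" = ""
    · rw [if_pos h1, ih b]
      simp [h1]
    · simp only [if_neg h1]
      by_cases h2 : (PySem.Dict.getD (PySem.Dict.mk st) "evidence" "").toList.any
          (fun c => PySem.Str.isdigit c) = true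
      · simp [h1, h2]
      · simp only [h2, if_false, Bool.false_eq_true]
        by_cases h3 : pvImpactWords.any
            (fun w => PySem.Str.isIn w (PySem.Str.lower (PySem.Dict.getD (PySem.Dict.mk st) "evidence" ""))) = true
        · simp only [h3, if_true]
          cases b with
          | none =>
            have := ih (some (PySem.Dict.getD (PySem.Dict.mk st) "evidence" ""))
            simp only [Option.map] at this ⊢
            rw [this]
            simp [h1]
          | some e =>
            have := ih (some e)
            simp only [Option.map] at this ⊢
            rw [if_neg (by omega), this]
            simp [h1]
        · simp only [h3, if_false, Bool.false_eq_true]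
          rw [ih b]
          simp [h1]

-- ===== VERDICT (by name: the statement is the Claim_ definition above) =====
theorem extract_best_achievement_py_spec : Claim_equal_extract_best_achievement_py := by
  intro strengths _
  show extract_best_achievement_py strengths = extract_best_achievement_py_alt strengths
  have hB := pvLoopB_spec strengths none
  simp only [Option.map] at hB
  cases strengths with
  | nil => rfl
  | cons first rest =>
    simp only [extract_best_achievement_py, extract_best_achievement_py_alt, hB,
      pvLoopDigitA_eq, pvLoopImpactA_eq]
    cases hd : pvFirstDigit (first :: rest) with
    | some ev => simp [pvCleanA, pvCleanB]
    | none =>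
      cases hi : pvFirstImpact (first :: rest) with
      | some ev => simp [pvCleanA, pvCleanB]
      | none => simp [pvCleanA, pvCleanB]
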